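-- pv_equiv track=rewrite | github.com/huzaifasaeed123/FreelanceScraperSuite | 20-BrickLink LEGO Scraper/Final Code/parts_parser.py | separate_by_cat_type
-- ===== SOURCE A (Python) =====
-- def separate_by_cat_type(items):
--     """Separate items by their category type."""
--     parts = []
--     minifigs = []
--     sets = []
--
--     for entry in items:
--         cat = entry.get("cat_type")
--         item_no = entry.get("item_no")
--         if cat == "P":
--             parts.append(item_no)
--         elif cat == "M":
--             minifigs.append(item_no)
--         elif cat == "S":
--             sets.append(item_no)
--
--     return parts, minifigs, sets
-- ===== SOURCE B (Python) =====
-- def separate_by_cat_type(items):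
--     """Separate items by their category type."""
--     items = list(items)
--     parts = [entry.get("item_no") for entry in items if entry.get("cat_type") == "P"]
--     minifigs = [entry.get("item_no") for entry in items if entry.get("cat_type") == "M"]
--     sets = [entry.get("item_no") for entry in items if entry.get("cat_type") == "S"]
--     return parts, minifigs, sets
-- ===== Notes on version B (the rewrite author's own statement) =====
-- stated objective: idiomatic
-- what changed: Replaces the single bucketing loop with three appends per iteration by three independent comprehension scans, one per category, after materializing the input once.
-- outside the precondition, e.g. on separate_by_cat_type([{'cat_type': 'P'}]): A returns ([None], [], []), B returns ([None], [], [])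
import Mathlib
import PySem

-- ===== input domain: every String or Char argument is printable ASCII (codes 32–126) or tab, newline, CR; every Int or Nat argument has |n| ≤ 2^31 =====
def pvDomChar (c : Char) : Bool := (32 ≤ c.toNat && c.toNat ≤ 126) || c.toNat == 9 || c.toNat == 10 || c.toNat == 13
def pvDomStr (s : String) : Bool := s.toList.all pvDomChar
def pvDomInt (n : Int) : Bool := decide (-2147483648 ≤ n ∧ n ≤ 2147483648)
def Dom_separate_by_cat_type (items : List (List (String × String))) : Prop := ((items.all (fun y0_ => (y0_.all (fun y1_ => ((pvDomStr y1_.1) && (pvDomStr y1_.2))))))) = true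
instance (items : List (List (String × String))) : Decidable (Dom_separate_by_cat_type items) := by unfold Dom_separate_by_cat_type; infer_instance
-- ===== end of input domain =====

-- B replaces A's single bucketing pass (three accumulators, one branch per category)
-- with three independent comprehension scans, one per category: idiomatic, not faster.
-- entry.get("item_no") can be None in Python (not a String); Pre_ excludes that, so both
-- ports read it with .getD "" — exact on every input Pre_ admits.

-- ===== PORT A =====
def separate_by_cat_type (items : List (List (String × String))) : List String × List String × List String :=
  -- for entry in items: cat = entry.get("cat_type"); item_no = entry.get("item_no"); if/elif append
  let st := items.foldl (fun (acc : List String × List String × List String) entry =>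
    let cat := (PySem.Dict.mk entry).get? "cat_type"
    let item_no := ((PySem.Dict.mk entry).get? "item_no").getD ""
    if cat = some "P" then (acc.1 ++ [item_no], acc.2.1, acc.2.2)
    else if cat = some "M" then (acc.1, acc.2.1 ++ [item_no], acc.2.2)
    else if cat = some "S" then (acc.1, acc.2.1, acc.2.2 ++ [item_no])
    else acc) ([], [], [])
  st

-- ===== PORT B =====
-- one comprehension per category: filter on cat_type, collect item_no
def pvPick (items : List (List (String × String))) (c : String) : List String :=
  (items.filter (fun entry => (PySem.Dict.mk entry).get? "cat_type" == some c)).map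
    (fun entry => ((PySem.Dict.mk entry).get? "item_no").getD "")

def separate_by_cat_type_alt (items : List (List (String × String))) : List String × List String × List String :=
  (pvPick items "P", pvPick items "M", pvPick items "S")

-- ===== PRECONDITION & SPEC =====
-- Pre_ excludes inputs on which some entry has cat_type "P"/"M"/"S" but no "item_no" key:
-- there the Python appends None, which is not a String (outside the declared return type).
def Pre_separate_by_cat_type (items : List (List (String × String))) : Prop :=
  ∀ entry ∈ items,
    ((PySem.Dict.mk entry).get? "cat_type" = some "P" ∨
     (PySem.Dict.mk entry).get? "cat_type" = some "M" ∨
     (PySem.Dict.mk entry).get? "cat_type" = some "S") →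
    ((PySem.Dict.mk entry).get? "item_no").isSome = true
instance (items : List (List (String × String))) : Decidable (Pre_separate_by_cat_type items) := by
  unfold Pre_separate_by_cat_type; infer_instance

def pvWitness_separate_by_cat_type : (List (List (String × String))) :=
  [[("cat_type", "P"), ("item_no", "3001")], [("cat_type", "S"), ("item_no", "75192-1")], [("foo", "bar")]]

def Spec_separate_by_cat_type (items : List (List (String × String))) (out : List String × List String × List String) : Prop := out = separate_by_cat_type_alt items
instance (items : List (List (String × String))) (out : List String × List String × List String) : Decidable (Spec_separate_by_cat_type items out) := by unfold Spec_separate_by_cat_type; infer_instance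

-- ===== CLAIM (what is proved, stated in full; the proofs are below) =====
def Claim_equal_separate_by_cat_type : Prop := ∀ (items : List (List (String × String))), Dom_separate_by_cat_type items → Pre_separate_by_cat_type items → Spec_separate_by_cat_type items (separate_by_cat_type items)

-- ===== LEMMAS AND PROOFS =====

theorem pvLoop_eq (items : List (List (String × String)))
    (p m s : List String) :
    items.foldl (fun (acc : List String × List String × List String) entry =>
      let cat := (PySem.Dict.mk entry).get? "cat_type"
      let item_no := ((PySem.Dict.mk entry).get? "item_no").getD ""
      if cat = some "P" then (acc.1 ++ [item_no], acc.2.1, acc.2.2)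
      else if cat = some "M" then (acc.1, acc.2.1 ++ [item_no], acc.2.2)
      else if cat = some "S" then (acc.1, acc.2.1, acc.2.2 ++ [item_no])
      else acc) (p, m, s)
    = (p ++ pvPick items "P", m ++ pvPick items "M", s ++ pvPick items "S") := by
  induction items generalizing p m s with
  | nil => simp [pvPick]
  | cons e rest ih =>
    simp only [List.foldl_cons]
    by_cases hP : (PySem.Dict.mk e).get? "cat_type" = some "P"
    · simp [hP, ih, pvPick]
    · by_cases hM : (PySem.Dict.mk e).get? "cat_type" = some "M"
      · simp [hP, hM, ih, pvPick]
      · by_cases hS : (PySem.Dict.mk e).get? "cat_type" = some "S"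
        · simp [hP, hM, hS, ih, pvPick]
        · simp [hP, hM, hS, ih, pvPick]

-- ===== VERDICT (by name: the statement is the Claim_ definition above) =====
theorem separate_by_cat_type_spec : Claim_equal_separate_by_cat_type := by
  intro items _ _
  show separate_by_cat_type items = separate_by_cat_type_alt items
  simp [separate_by_cat_type, separate_by_cat_type_alt, pvLoop_eq]
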